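-- pv_equiv track=rewrite | github.com/fdebrus/Nikobus-HA | custom_components/nikobus/utils.py | append_crc2
-- ===== SOURCE A (Python) =====
-- def append_crc2(input: str) -> str:
--     check = 0
--
--     for b in input.encode():
--         check ^= b
--
--         for i in range(8):
--             if ((check & 0xFF) >> 7) != 0:
--                 check = (check << 1) ^ 0x99
--             else:
--                 check = check << 1
--             check &= 0xFF
--
--     return input + f"{check:02x}".zfill(2).upper()
-- ===== SOURCE B (Python) =====
-- def _crc_byte(x: int) -> int:
--     for _ in range(8):
--         x = ((x << 1) ^ 0x99) & 0xFF if x & 0x80 else (x << 1) & 0xFF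
--     return x
--
-- _TABLE = [_crc_byte(x) for x in range(256)]
--
-- def append_crc2(input: str) -> str:
--     check = 0
--     for b in input.encode():
--         check = _TABLE[check ^ b]
--     return input + format(check, "02X")
-- ===== Notes on version B (the rewrite author's own statement) =====
-- stated objective: faster
-- what changed: Replaces the per-byte 8-iteration bit loop with a 256-entry CRC8 lookup table built once, so the byte loop becomes a single table lookup per byte.
import Mathlib
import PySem

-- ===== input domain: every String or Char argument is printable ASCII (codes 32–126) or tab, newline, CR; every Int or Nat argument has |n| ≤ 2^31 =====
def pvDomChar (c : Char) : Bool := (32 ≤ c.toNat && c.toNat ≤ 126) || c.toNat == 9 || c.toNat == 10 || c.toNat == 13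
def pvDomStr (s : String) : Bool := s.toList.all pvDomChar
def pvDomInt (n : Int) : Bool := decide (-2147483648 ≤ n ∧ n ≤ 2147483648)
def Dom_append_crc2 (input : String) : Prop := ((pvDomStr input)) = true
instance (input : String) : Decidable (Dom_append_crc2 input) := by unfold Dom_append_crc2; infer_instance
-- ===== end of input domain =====

-- B replaces A's per-byte 8-iteration bit loop by a one-time 256-entry CRC8 table and one lookup per byte (faster by a constant factor).

-- ===== PORT A =====
-- shared helper: f"{check:02x}".zfill(2).upper() — exact for 0 ≤ n < 256 (both programs only format such values)
def pvHexDigitU (n : Nat) : Char :=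
  if n < 10 then Char.ofNat (48 + n) else Char.ofNat (55 + n)
def pvHex2U (n : Nat) : String :=
  String.ofList [pvHexDigitU (n / 16), pvHexDigitU (n % 16)]

-- inner 'for i in range(8)' body of A
def pvBitStepA (c : Nat) : Nat :=
  let c := if (c &&& 0xFF) >>> 7 ≠ 0 then (c <<< 1) ^^^ 0x99 else c <<< 1
  c &&& 0xFF

-- literal port of A: fold over the encoded bytes (Dom restricts input to ASCII, so encode() gives the char codes),
-- with the nested 8-iteration bit loop
def append_crc2 (input : String) : String :=
  let check := input.toList.foldl
    (fun check ch => (List.range 8).foldl (fun c _ => pvBitStepA c) (check ^^^ ch.toNat)) 0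
  input ++ pvHex2U check

-- ===== PORT B =====
-- _crc_byte: 8 rounds of the bit step, written as recursion on the round count
def pvCrcRounds : Nat → Nat → Nat
  | c, 0 => c
  | c, n + 1 =>
      pvCrcRounds (if c &&& 0x80 ≠ 0 then ((c <<< 1) ^^^ 0x99) &&& 0xFF else (c <<< 1) &&& 0xFF) n

-- _TABLE = [_crc_byte(x) for x in range(256)]
def pvCrcTable : List Nat := (List.range 256).map (fun x => pvCrcRounds x 8)

-- literal port of B: one table lookup per byte; format(check, "02X") = pvHex2U check for check < 256
def append_crc2_alt (input : String) : String :=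
  let check := input.toList.foldl (fun check ch => pvCrcTable.getD (check ^^^ ch.toNat) 0) 0
  input ++ pvHex2U check

-- ===== PRECONDITION & SPEC =====
def Spec_append_crc2 (input : String) (out : String) : Prop := out = append_crc2_alt input
instance (input : String) (out : String) : Decidable (Spec_append_crc2 input out) := by unfold Spec_append_crc2; infer_instance

-- ===== CLAIM (what is proved, stated in full; the proofs are below) =====
def Claim_equal_append_crc2 : Prop := ∀ (input : String), Dom_append_crc2 input → Spec_append_crc2 input (append_crc2 input)

-- ===== LEMMAS AND PROOFS =====

-- _crc_byte agrees with A's 8-round inner loop on every byte value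
set_option maxRecDepth 4096 in
theorem pvRounds_eq_foldA : ∀ y : Fin 256,
    pvCrcRounds y.val 8 = (List.range 8).foldl (fun c _ => pvBitStepA c) y.val := by
  decide

-- table entry x (x < 256) equals A's 8-round inner loop applied to x
theorem pvTable_eq (x : Nat) (hx : x < 256) :
    pvCrcTable.getD x 0 = (List.range 8).foldl (fun c _ => pvBitStepA c) x := by
  have h1 : pvCrcTable.getD x 0 = pvCrcRounds x 8 := by
    simp [pvCrcTable, List.getD_eq_getElem?_getD, hx]
  rw [h1, pvRounds_eq_foldA ⟨x, hx⟩]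

theorem pvRounds_lt (c n : Nat) : pvCrcRounds c (n + 1) < 256 := by
  induction n generalizing c with
  | zero =>
      simp only [pvCrcRounds]
      split <;> exact Nat.lt_succ_of_le (Nat.and_le_right)
  | succ n ih => exact ih _

theorem pvFold_eq (l : List Char) (c : Nat) (hc : c < 256)
    (hl : ∀ ch ∈ l, ch.toNat < 256) :
    l.foldl (fun check ch => (List.range 8).foldl (fun c _ => pvBitStepA c) (check ^^^ ch.toNat)) c
      = l.foldl (fun check ch => pvCrcTable.getD (check ^^^ ch.toNat) 0) c := by
  induction l generalizing c with
  | nil => rfl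
  | cons ch t ih =>
      have hx : c ^^^ ch.toNat < 256 :=
        Nat.xor_lt_two_pow (n := 8) hc (hl ch (List.mem_cons_self ..))
      simp only [List.foldl_cons]
      rw [pvTable_eq _ hx, ← pvRounds_eq_foldA ⟨_, hx⟩]
      exact ih _ (pvRounds_lt (c ^^^ ch.toNat) 7) (fun x hx' => hl x (List.mem_cons_of_mem _ hx'))

-- ===== VERDICT (by name: the statement is the Claim_ definition above) =====
theorem append_crc2_spec : Claim_equal_append_crc2 := by
  intro input hdom
  unfold Spec_append_crc2 append_crc2 append_crc2_alt
  have hl : ∀ ch ∈ input.toList, ch.toNat < 256 := by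
    intro ch hch
    have := List.all_eq_true.mp hdom ch hch
    simp only [pvDomChar, Bool.or_eq_true, Bool.and_eq_true, decide_eq_true_eq, beq_iff_eq] at this
    omega
  rw [pvFold_eq input.toList 0 (by norm_num) hl]
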